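-- pv_equiv track=rewrite | github.com/SpaceJ0392/CodingTest | python/[PCCP 기출문제 3번]충돌위험찾기.py | crash
-- ===== SOURCE A (Python) =====
-- def crash(now, event_set):
--     crash_cnt = 0
--     event_dict = dict()
--
--     for y, x in now.values():
--         if (y, x) in event_dict : event_dict[(y, x)] += 1
--         else : event_dict[(y, x)] = 1
--
--     for key, val in event_dict.items():
--         if val > 1 :
--             crash_cnt += 1
--             event_set.add(key)
--
--     return crash_cnt
-- ===== SOURCE B (Python) =====
-- def crash(now, event_set):
--     positions = sorted(now.values())
--     if not positions:
--         return 0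
--     crash_cnt = 0
--     run = positions[0]
--     run_len = 1
--     for p in positions[1:]:
--         if p == run:
--             run_len += 1
--         else:
--             if run_len > 1:
--                 crash_cnt += 1
--                 event_set.add(run)
--             run = p
--             run_len = 1
--     if run_len > 1:
--         crash_cnt += 1
--         event_set.add(run)
--     return crash_cnt
-- ===== Notes on version B (the rewrite author's own statement) =====
-- stated objective: alternative
-- what changed: Groups duplicate positions by sorting the value list and scanning adjacent runs (counting each run of length > 1 once) instead of building a frequency dictionary and then scanning its items.
import Mathlib
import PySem

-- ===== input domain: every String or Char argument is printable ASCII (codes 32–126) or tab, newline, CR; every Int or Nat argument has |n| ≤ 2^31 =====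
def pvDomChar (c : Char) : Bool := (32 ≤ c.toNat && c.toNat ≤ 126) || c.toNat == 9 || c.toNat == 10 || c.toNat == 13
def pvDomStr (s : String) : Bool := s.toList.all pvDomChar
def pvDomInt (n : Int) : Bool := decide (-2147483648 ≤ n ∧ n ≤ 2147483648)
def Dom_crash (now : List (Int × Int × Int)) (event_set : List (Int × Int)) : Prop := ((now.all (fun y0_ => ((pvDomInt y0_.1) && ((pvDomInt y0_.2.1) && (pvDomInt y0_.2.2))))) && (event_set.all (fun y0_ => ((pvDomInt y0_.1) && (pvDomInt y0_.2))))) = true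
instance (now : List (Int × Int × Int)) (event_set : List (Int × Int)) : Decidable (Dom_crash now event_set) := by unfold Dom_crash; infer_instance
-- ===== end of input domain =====

-- B groups duplicate positions by sort-and-scan over adjacent runs instead of A's frequency
-- dictionary; equivalence is about the return value (both add the same positions to event_set).


-- ===== PORT A =====
-- now is a Python dict id -> (y, x); its values in insertion order (duplicate keys overwrite):
def pvValues (now : List (Int × Int × Int)) : List (Int × Int) :=
  (PySem.Dict.ofList now).values

def crash (now : List (Int × Int × Int)) (_event_set : List (Int × Int)) : Int :=
  -- for y, x in now.values(): event_dict[(y,x)] += 1  /  event_dict[(y,x)] = 1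
  -- for key, val in event_dict.items(): if val > 1: crash_cnt += 1 (event_set.add(key): side effect)
  (((pvValues now).foldl
      (fun d p => if d.contains p then d.insert p (d.getD p 0 + 1) else d.insert p 1)
      (PySem.Dict.empty : PySem.Dict (Int × Int) Int)).items).foldl
    (fun acc kv => if 1 < kv.2 then acc + 1 else acc) 0

-- ===== PORT B =====
-- the loop of Source B over positions[1:] with state (run, run_len, crash_cnt), then the final run check
def pvScan (run : Int × Int) (runLen : Int) (rest : List (Int × Int)) (cnt : Int) : Int :=
  match rest with
  | [] => if 1 < runLen then cnt + 1 else cnt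
  | p :: rest' =>
      if p == run then pvScan run (runLen + 1) rest' cnt
      else pvScan p 1 rest' (if 1 < runLen then cnt + 1 else cnt)

def crash_alt (now : List (Int × Int × Int)) (_event_set : List (Int × Int)) : Int :=
  -- positions = sorted(now.values()): Python's tuple order = lexicographic
  match PySem.List.sorted (pvValues now) (fun p => (toLex p : Lex (Int × Int))) with
  | [] => 0
  | p :: rest => pvScan p 1 rest 0

-- ===== PRECONDITION & SPEC =====
def Spec_crash (now : List (Int × Int × Int)) (event_set : List (Int × Int)) (out : Int) : Prop := out = crash_alt now event_set
instance (now : List (Int × Int × Int)) (event_set : List (Int × Int)) (out : Int) : Decidable (Spec_crash now event_set out) := by unfold Spec_crash; infer_instance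

-- ===== CLAIM (what is proved, stated in full; the proofs are below) =====
def Claim_equal_crash : Prop := ∀ (now : List (Int × Int × Int)) (event_set : List (Int × Int)), Dom_crash now event_set → Spec_crash now event_set (crash now event_set)

-- ===== LEMMAS AND PROOFS =====

-- number of distinct elements of L occurring more than once
def pvT (L : List (Int × Int)) : Nat :=
  (PySem.Set.ofList L).countP (fun k => decide (1 < L.count k))

-- the same, over the distinct elements of L other than p
def pvRTally (p : Int × Int) (L : List (Int × Int)) : Nat :=
  ((PySem.Set.ofList L).discard p).countP (fun k => decide (1 < L.count k))

lemma pv_discard_of_not_mem (s : PySem.Set (Int × Int)) (x : Int × Int) (h : x ∉ s) :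
    PySem.Set.discard s x = s := by
  simp only [PySem.Set.discard]
  refine List.filter_eq_self.mpr ?_
  intro b hb
  cases hbeq : b == x with
  | false => simp
  | true => exact absurd ((eq_of_beq hbeq) ▸ hb) h

lemma pvT_cons (q : Int × Int) (rest : List (Int × Int)) :
    pvT (q :: rest) = (if 1 < rest.count q + 1 then 1 else 0) + pvRTally q rest := by
  unfold pvT pvRTally
  rw [PySem.Set.ofList_cons, List.countP_cons]
  have hcg : ((PySem.Set.ofList rest).discard q).countP
        (fun k => decide (1 < (q :: rest).count k)) =
      ((PySem.Set.ofList rest).discard q).countP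
        (fun k => decide (1 < rest.count k)) := by
    refine List.countP_congr ?_
    intro k hk
    have hkq : k ≠ q := ((PySem.Set.mem_discard _ _ _).1 hk).2
    rw [List.count_cons_of_ne (Ne.symm hkq)]
  rw [hcg, List.count_cons_self]
  by_cases h : 1 < rest.count q + 1 <;> simp [h] <;> omega

lemma pvT_perm {L M : List (Int × Int)} (h : L.Perm M) : pvT L = pvT M := by
  unfold pvT
  have hset : (PySem.Set.ofList L).Perm (PySem.Set.ofList M) := by
    rw [List.perm_ext_iff_of_nodup (PySem.Set.nodup_ofList L) (PySem.Set.nodup_ofList M)]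
    intro k
    rw [PySem.Set.mem_ofList, PySem.Set.mem_ofList]
    exact h.mem_iff
  have hcnt : (PySem.Set.ofList L).countP (fun k => decide (1 < L.count k)) =
      (PySem.Set.ofList L).countP (fun k => decide (1 < M.count k)) := by
    refine List.countP_congr ?_
    intro k _
    rw [h.count_eq]
  rw [hcnt, hset.countP_eq]

lemma pvRTally_cons_self (p : Int × Int) (rest : List (Int × Int)) :
    pvRTally p (p :: rest) = pvRTally p rest := by
  unfold pvRTally
  rw [PySem.Set.ofList_cons]
  have h1 : PySem.Set.discard (p :: PySem.Set.discard (PySem.Set.ofList rest) p) p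
      = PySem.Set.discard (PySem.Set.ofList rest) p := by
    simp [PySem.Set.discard, List.filter_filter]
  rw [h1]
  refine List.countP_congr ?_
  intro k hk
  have hkp : k ≠ p := ((PySem.Set.mem_discard _ _ _).1 hk).2
  rw [List.count_cons_of_ne (Ne.symm hkp)]

-- the sorted-run scan of B tallies one run at a time
lemma pvScan_eq (L : List (Int × Int)) : ∀ (p : Int × Int) (len cnt : Int),
    1 ≤ len →
    (p :: L).Pairwise (fun a b => (toLex a : Lex (Int × Int)) ≤ toLex b) →
    pvScan p len L cnt =
      cnt + (if 1 < len + (L.count p : Int) then 1 else 0) + (pvRTally p L : Int) := by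
  induction L with
  | nil =>
      intro p len cnt _ _
      by_cases h : (1 : Int) < len <;>
        simp [pvScan, pvRTally, PySem.Set.ofList_nil, h]
  | cons q rest ih =>
      intro p len cnt hlen hs
      have hs' : (q :: rest).Pairwise (fun a b => (toLex a : Lex (Int × Int)) ≤ toLex b) :=
        hs.of_cons
      by_cases hqp : q = p
      · subst hqp
        simp only [pvScan, beq_self_eq_true, if_true]
        rw [ih q (len + 1) cnt (by omega) hs']
        rw [pvRTally_cons_self, List.count_cons_self]
        have harith : len + ((rest.count q + 1 : Nat) : Int) = len + 1 + (rest.count q : Int) := by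
          push_cast; ring
        rw [harith]
      · have hpq : p ≠ q := fun h => hqp h.symm
        have hpnot : p ∉ q :: rest := by
          intro hmem
          rcases List.mem_cons.1 hmem with h | hmem'
          · exact hpq h
          · have h1 : (toLex q : Lex (Int × Int)) ≤ toLex p :=
              (List.pairwise_cons.1 hs').1 p hmem'
            have h2 : (toLex p : Lex (Int × Int)) ≤ toLex q :=
              (List.pairwise_cons.1 hs).1 q List.mem_cons_self
            exact hpq (by simpa using le_antisymm h2 h1)
        have hbeq : (q == p) = false := by simp [hqp]
        simp only [pvScan, hbeq, Bool.false_eq_true, if_false]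
        rw [ih q 1 (if 1 < len then cnt + 1 else cnt) le_rfl hs']
        have hcp : ((q :: rest).count p : Int) = 0 := by
          simp [List.count_eq_zero.2 hpnot]
        have hrt : pvRTally p (q :: rest) = pvT (q :: rest) := by
          unfold pvRTally pvT
          rw [pv_discard_of_not_mem _ _ (by rw [PySem.Set.mem_ofList]; exact hpnot)]
        rw [hcp, hrt, pvT_cons]
        have hiff : ((1 : Int) < 1 + (rest.count q : Int)) ↔ (1 < rest.count q + 1) := by omega
        rw [if_congr hiff rfl rfl]
        push_cast
        by_cases h1 : (1 : Int) < len <;> by_cases h2 : 1 < rest.count q + 1 <;>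
          simp [h1, h2] <;> ring

lemma pvScan_head (p : Int × Int) (rest : List (Int × Int))
    (hpw : (p :: rest).Pairwise (fun a b => (toLex a : Lex (Int × Int)) ≤ toLex b)) :
    pvScan p 1 rest 0 = (pvT (p :: rest) : Int) := by
  rw [pvScan_eq rest p 1 0 le_rfl hpw, pvT_cons]
  have hiff : ((1 : Int) < 1 + (rest.count p : Int)) ↔ (1 < rest.count p + 1) := by omega
  rw [if_congr hiff rfl rfl]
  by_cases h : 1 < rest.count p + 1 <;> simp [h]

lemma crash_eq_tally (vs : List (Int × Int)) :
    ((vs.foldl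
        (fun d p => if d.contains p then d.insert p (d.getD p 0 + 1) else d.insert p 1)
        (PySem.Dict.empty : PySem.Dict (Int × Int) Int)).items).foldl
      (fun acc kv => if 1 < kv.2 then acc + 1 else acc) (0 : Int) = (pvT vs : Int) := by
  have h1 := PySem.List.foldl_congr_mem vs
    (fun d p => if d.contains p then d.insert p (d.getD p 0 + 1) else d.insert p 1)
    (fun d p => d.insert p (d.getD p 0 + 1))
    (PySem.Dict.empty : PySem.Dict (Int × Int) Int)
    (by
      intro acc x _
      by_cases hc : acc.contains x = true
      · simp [hc]
      · have h0 : acc.getD x 0 = 0 := by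
          apply PySem.Dict.getD_of_not_contains
          simpa using hc
        simp [hc, h0])
  rw [h1]
  -- PySem.Dict.counter is definitionally this fold (foldl_insert_getD_add_one_eq_counter)
  show (List.foldl (fun acc kv => if 1 < kv.2 then acc + 1 else acc) 0
    (PySem.Dict.counter vs).items) = (pvT vs : Int)
  rw [PySem.Dict.items_counter, PySem.List.foldl_ite_add_one, List.countP_map]
  have hc2 : List.countP
      ((fun (x : (Int × Int) × Int) => decide (1 < x.2)) ∘
        (fun k => (k, ((vs.count k : Nat) : Int)))) (PySem.Set.ofList vs) = pvT vs := by
    unfold pvT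
    refine List.countP_congr ?_
    intro k _
    simp [Function.comp]
  rw [hc2, zero_add]

lemma crash_alt_eq_tally (now : List (Int × Int × Int)) (es : List (Int × Int)) :
    crash_alt now es = (pvT (pvValues now) : Int) := by
  unfold crash_alt
  have hperm : (PySem.List.sorted (pvValues now)
      (fun p => (toLex p : Lex (Int × Int)))).Perm (pvValues now) :=
    PySem.List.sorted_perm _ _ _
  have hpw := PySem.List.sorted_pairwise (pvValues now)
      (fun p => (toLex p : Lex (Int × Int)))
  cases h : PySem.List.sorted (pvValues now) (fun p => (toLex p : Lex (Int × Int))) with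
  | nil =>
      rw [h] at hperm
      have hnil : pvValues now = [] := (List.perm_nil.mp hperm.symm)
      show (0 : Int) = (pvT (pvValues now) : Int)
      simp [hnil, pvT, PySem.Set.ofList_nil]
  | cons p rest =>
      rw [h] at hperm hpw
      show pvScan p 1 rest 0 = (pvT (pvValues now) : Int)
      rw [← pvT_perm hperm]
      exact pvScan_head p rest hpw

-- ===== VERDICT (by name: the statement is the Claim_ definition above) =====
theorem crash_spec : Claim_equal_crash := by
  intro now event_set _
  unfold Spec_crash crash
  rw [crash_alt_eq_tally now event_set]
  exact crash_eq_tally (pvValues now)
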